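-- pv_equiv track=rewrite | github.com/Epyur/Epics | Gen_7/methods/indicators.py | FindeWorsest
-- ===== SOURCE A (Python) =====
-- def FindeWorsest(litera, comb_list):
--     l1 = []
--
--     for i in comb_list:
--         if litera in i:
--             l1.append(i)
--     if len(l1) == len(comb_list):
--             p = max(l1)
--
--     else:
--
--         p = 'Не может быть проведена оценка на основании представленного набора показателей'
--
--     return p
-- ===== SOURCE B (Python) =====
-- ERROR_MSG = 'Не может быть проведена оценка на основании представленного набора показателей'
--
-- def FindeWorsest(litera, comb_list):
--     # single pass: track the running maximum, bail out early on the first bad item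
--     best = comb_list[0]
--     for s in comb_list:
--         if litera not in s:
--             return ERROR_MSG
--         if s > best:
--             best = s
--     return best
-- ===== Notes on version B (the rewrite author's own statement) =====
-- stated objective: alternative
-- what changed: Single pass maintaining a running maximum with an early return on the first item lacking the letter, instead of building a filtered list, comparing lengths and calling max on it.
import Mathlib
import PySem

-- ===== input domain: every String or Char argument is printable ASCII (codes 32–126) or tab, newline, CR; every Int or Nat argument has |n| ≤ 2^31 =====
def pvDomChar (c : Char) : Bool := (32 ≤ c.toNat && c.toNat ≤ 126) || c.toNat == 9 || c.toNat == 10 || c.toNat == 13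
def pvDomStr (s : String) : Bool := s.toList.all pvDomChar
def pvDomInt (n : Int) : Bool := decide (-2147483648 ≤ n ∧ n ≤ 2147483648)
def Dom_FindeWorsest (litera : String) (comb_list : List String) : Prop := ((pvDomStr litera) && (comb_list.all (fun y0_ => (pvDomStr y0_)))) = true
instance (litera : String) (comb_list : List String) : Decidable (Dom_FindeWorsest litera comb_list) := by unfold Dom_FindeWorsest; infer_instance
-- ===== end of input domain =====

-- B does a single pass with a running maximum and an early return on the first bad item, instead of A's filtered list + length comparison + max.


-- ===== PORT A =====
def FindeWorsest (litera : String) (comb_list : List String) : String :=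
  let l1 := comb_list.foldl (fun acc i => if PySem.Str.isIn litera i then acc ++ [i] else acc) []
  if l1.length = comb_list.length then
    (PySem.List.max? l1 (fun x => x)).getD ""   -- max([]) raises ValueError in Python; excluded by Pre_
  else
    "Не может быть проведена оценка на основании представленного набора показателей"

-- ===== PORT B =====
-- the for-loop of Source B with its early return, as structural recursion over the list
def pvGoB (litera : String) : List String → String → String
  | [], best => best
  | s :: rest, best =>
      if PySem.Str.isIn litera s then
        pvGoB litera rest (if best < s then s else best)   -- 'if s > best: best = s'
      else
        "Не может быть проведена оценка на основании представленного набора показателей"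

def FindeWorsest_alt (litera : String) (comb_list : List String) : String :=
  let best := (PySem.List.pyGet? comb_list 0).getD ""   -- comb_list[0]; IndexError on [] is excluded by Pre_
  pvGoB litera comb_list best

-- ===== PRECONDITION & SPEC =====
-- A raises ValueError (max of the empty list) exactly when comb_list = []; Pre_ excludes only that.
def Pre_FindeWorsest (litera : String) (comb_list : List String) : Prop := comb_list ≠ []
instance (litera : String) (comb_list : List String) : Decidable (Pre_FindeWorsest litera comb_list) := by unfold Pre_FindeWorsest; infer_instance
def pvWitness_FindeWorsest : String × List String := ("a", ["ab", "ac"])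

def Spec_FindeWorsest (litera : String) (comb_list : List String) (out : String) : Prop := out = FindeWorsest_alt litera comb_list
instance (litera : String) (comb_list : List String) (out : String) : Decidable (Spec_FindeWorsest litera comb_list out) := by unfold Spec_FindeWorsest; infer_instance

-- ===== CLAIM =====
def Claim_equal_FindeWorsest : Prop := ∀ (litera : String) (comb_list : List String), Dom_FindeWorsest litera comb_list → Pre_FindeWorsest litera comb_list → Spec_FindeWorsest litera comb_list (FindeWorsest litera comb_list)

-- ===== LEMMAS AND PROOFS =====
theorem pv_foldl_filter (p : String → Bool) (xs : List String) (acc : List String) :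
    xs.foldl (fun acc i => if p i then acc ++ [i] else acc) acc = acc ++ xs.filter p := by
  induction xs generalizing acc with
  | nil => simp
  | cons x t ih =>
    simp only [List.foldl_cons, List.filter_cons]
    by_cases h : p x = true <;> simp [h, ih]

theorem pvGoB_bad (litera : String) (xs : List String) (best : String)
    (h : ∃ s ∈ xs, PySem.Str.isIn litera s = false) :
    pvGoB litera xs best =
      "Не может быть проведена оценка на основании представленного набора показателей" := by
  induction xs generalizing best with
  | nil => simp at h
  | cons x t ih =>
    obtain ⟨s, hs, hbad⟩ := h
    by_cases hx : PySem.Str.isIn litera x = true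
    · rcases List.mem_cons.mp hs with rfl | hs
      · exact absurd hx (by rw [hbad]; decide)
      · simp only [pvGoB, hx, if_true]
        exact ih _ ⟨s, hs, hbad⟩
    · rw [pvGoB, if_neg hx]

theorem pvGoB_good (litera : String) (xs : List String) (best : String)
    (h : ∀ s ∈ xs, PySem.Str.isIn litera s = true) :
    pvGoB litera xs best = xs.foldl max best := by
  induction xs generalizing best with
  | nil => rfl
  | cons x t ih =>
    have hx := h x (List.mem_cons_self ..)
    have hstep : (if best < x then x else best) = max best x := by
      by_cases hlt : best < x
      · rw [if_pos hlt, max_eq_right hlt.le]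
      · rw [if_neg hlt, max_eq_left (not_lt.mp hlt)]
    simp only [pvGoB, hx, if_true, List.foldl_cons, hstep]
    exact ih _ (fun s hs => h s (List.mem_cons_of_mem _ hs))

-- ===== VERDICT =====
theorem FindeWorsest_spec : Claim_equal_FindeWorsest := by
  intro litera comb_list _hd hp
  unfold Spec_FindeWorsest FindeWorsest FindeWorsest_alt
  obtain ⟨x, t, rfl⟩ := List.exists_cons_of_ne_nil hp
  simp only [pv_foldl_filter, List.nil_append, PySem.List.pyGet?_zero_cons, Option.getD_some]
  by_cases h : ∀ s ∈ x :: t, PySem.Str.isIn litera s = true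
  · have hfe : (x :: t).filter (fun i => PySem.Str.isIn litera i) = x :: t :=
      List.filter_eq_self.mpr h
    rw [hfe, pvGoB_good litera _ _ h]
    simp [PySem.List.max?_id_cons]
  · push Not at h
    obtain ⟨s, hs, hbad⟩ := h
    have hbad' : PySem.Str.isIn litera s = false := eq_false_of_ne_true hbad
    have hlen : ((x :: t).filter (fun i => PySem.Str.isIn litera i)).length ≠ (x :: t).length := by
      intro hc
      have := List.length_filter_eq_length_iff.mp hc s hs
      exact hbad this
    rw [pvGoB_bad litera _ _ ⟨s, hs, hbad'⟩, if_neg hlen]
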